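-- pv_equiv track=rewrite | github.com/khusrokarim/aoc2023 | day11.py | find_x_coordinates
-- ===== SOURCE A (Python) =====
-- def find_x_coordinates(line, expand_by=1):
--     """
--     >>> list(find_x_coordinates("#....#......."))
--     [0, 5]
--     >>> list(find_x_coordinates("#.>..#......."))
--     [0, 6]
--     >>> list(find_x_coordinates("#.>v.#.......", expand_by=5))
--     [0, 10]
--     >>> list(find_x_coordinates("#.>vx#...v...", expand_by=5))
--     [0, 15]
--     """
--     x_index = 0
--     for character in line:
--         if character == "#":
--             yield x_index
--         elif character in ">x":
--             x_index += expand_by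
--         x_index += 1
-- ===== SOURCE B (Python) =====
-- def find_x_coordinates(line, expand_by=1):
--     # Forward pass: pref[i] = number of ">"/"x" characters strictly before position i.
--     pref = []
--     count = 0
--     for ch in line:
--         pref.append(count)
--         if ch in ">x":
--             count += 1
--     # Lazy filtering pass over the precomputed table.
--     return (i + expand_by * pref[i] for i, ch in enumerate(line) if ch == "#")
-- ===== Notes on version B (the rewrite author's own statement) =====
-- stated objective: alternative
-- what changed: Replaced A's single loop with a running x_index accumulator by two passes: a forward pass building a prefix table pref[i] = count of '>'/'x' before position i, then a lazy filtering pass over enumerate(line) yielding i + expand_by * pref[i] at each '#'.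
import Mathlib
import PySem

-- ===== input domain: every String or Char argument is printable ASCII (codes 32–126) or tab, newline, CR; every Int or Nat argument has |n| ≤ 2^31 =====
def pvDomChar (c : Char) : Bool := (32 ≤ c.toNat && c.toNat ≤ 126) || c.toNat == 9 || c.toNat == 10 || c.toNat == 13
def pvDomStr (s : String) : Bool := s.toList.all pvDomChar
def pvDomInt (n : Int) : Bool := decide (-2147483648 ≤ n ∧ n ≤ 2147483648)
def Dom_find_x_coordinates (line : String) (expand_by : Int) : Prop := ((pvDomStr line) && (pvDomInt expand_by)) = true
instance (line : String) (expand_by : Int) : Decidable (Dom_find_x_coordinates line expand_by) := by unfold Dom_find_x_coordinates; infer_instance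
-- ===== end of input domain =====

-- B replaces A's single running-accumulator loop with a precomputed prefix-count table
-- followed by a separate filtering pass over enumerate(line) (objective: alternative decomposition).

-- ===== PORT A =====
-- A's generator loop: yield x_index at '#', add expand_by at '>'/'x', always add 1.
def findXGoA (expand_by : Int) : List Char → Int → List Int
  | [], _ => []
  | c :: cs, x =>
    if c == '#' then x :: findXGoA expand_by cs (x + 1)
    else if c == '>' || c == 'x' then findXGoA expand_by cs (x + expand_by + 1)
    else findXGoA expand_by cs (x + 1)

def find_x_coordinates (line : String) (expand_by : Int) : List Int :=
  findXGoA expand_by line.toList 0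

-- ===== PORT B =====
-- B's first pass: pref[i] = count of '>'/'x' strictly before position i.
def prefTableB : List Char → Int → List Int
  | [], _ => []
  | c :: cs, count => count :: prefTableB cs (if c == '>' || c == 'x' then count + 1 else count)

def find_x_coordinates_alt (line : String) (expand_by : Int) : List Int :=
  let pref := prefTableB line.toList 0
  (PySem.List.enumerate line.toList).filterMap
    (fun p => if p.2 == '#' then some (p.1 + expand_by * PySem.List.pyGetD pref p.1 0) else none)

-- ===== PRECONDITION & SPEC =====
def Spec_find_x_coordinates (line : String) (expand_by : Int) (out : List Int) : Prop := out = find_x_coordinates_alt line expand_by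
instance (line : String) (expand_by : Int) (out : List Int) : Decidable (Spec_find_x_coordinates line expand_by out) := by unfold Spec_find_x_coordinates; infer_instance

-- ===== CLAIM (what is proved, stated in full; the proofs are below) =====
def Claim_equal_find_x_coordinates : Prop := ∀ (line : String) (expand_by : Int), Dom_find_x_coordinates line expand_by → Spec_find_x_coordinates line expand_by (find_x_coordinates line expand_by)

-- ===== LEMMAS AND PROOFS =====

theorem findX_go_eq (e : Int) (cs : List Char) : ∀ (n : Nat) (k : Int),
    findXGoA e cs ((n : Int) + e * k) =
      (PySem.List.enumerate cs (n : Int)).filterMap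
        (fun p => if p.2 == '#' then some (p.1 + e * PySem.List.pyGetD (prefTableB cs k) (p.1 - (n : Int)) 0) else none) := by
  induction cs with
  | nil => intro n k; simp [findXGoA, prefTableB, PySem.List.enumerate_nil]
  | cons c cs ih =>
    intro n k
    have tail : ∀ (k' : Int),
        (PySem.List.enumerate cs ((n : Int) + 1)).filterMap
          (fun p => if p.2 == '#' then some (p.1 + e * PySem.List.pyGetD (k :: prefTableB cs k') (p.1 - (n : Int)) 0) else none)
        = (PySem.List.enumerate cs (((n + 1 : Nat) : Int))).filterMap
          (fun p => if p.2 == '#' then some (p.1 + e * PySem.List.pyGetD (prefTableB cs k') (p.1 - ((n + 1 : Nat) : Int)) 0) else none) := by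
      intro k'
      have hc : ((n : Int) + 1) = ((n + 1 : Nat) : Int) := by push_cast; ring
      rw [hc]
      apply List.filterMap_congr
      intro p hp
      rw [PySem.List.mem_enumerate_iff] at hp
      obtain ⟨j, hj, rfl⟩ := hp
      have h1 : (((n + 1 : Nat) : Int) + j) - (n : Int) = ((j + 1 : Nat) : Int) := by push_cast; ring
      have h2 : PySem.List.pyGetD (k :: prefTableB cs k') ((j + 1 : Nat) : Int) 0
          = PySem.List.pyGetD (prefTableB cs k') ((j : Nat) : Int) 0 := by
        simp only [PySem.List.pyGetD_natCast]
        simp [List.getD]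
      have h3 : (((n + 1 : Nat) : Int) + j) - ((n + 1 : Nat) : Int) = ((j : Nat) : Int) := by push_cast; ring
      simp only [h1, h2, h3]
    rw [PySem.List.enumerate_cons]
    by_cases hhash : c = '#'
    · subst hhash
      simp only [findXGoA, prefTableB, List.filterMap_cons,
        show ('#' == '#') = true from rfl, show ('#' == '>' || '#' == 'x') = false from rfl,
        if_true, Bool.false_eq_true, if_false]
      have hk : PySem.List.pyGetD (k :: prefTableB cs k) ((n : Int) - (n : Int)) 0 = k := by
        simp [PySem.List.pyGetD]
      have hx : ((n : Int) + e * k) + 1 = (((n + 1 : Nat) : Int)) + e * k := by push_cast; ring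
      rw [hk, tail k, hx, ih (n + 1) k]
    · by_cases hgx : c = '>' ∨ c = 'x'
      · have hb : (c == '>' || c == 'x') = true := by
          rcases hgx with h | h <;> simp [h]
        have hne : (c == '#') = false := by simp [hhash]
        simp only [findXGoA, prefTableB, List.filterMap_cons, hne, hb, if_true,
          Bool.false_eq_true, if_false]
        have hx : ((n : Int) + e * k) + e + 1 = (((n + 1 : Nat) : Int)) + e * (k + 1) := by push_cast; ring
        rw [tail (k + 1), hx, ih (n + 1) (k + 1)]
      · have hne : (c == '#') = false := by simp [hhash]
        have hb : (c == '>' || c == 'x') = false := by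
          push Not at hgx; simp [hgx.1, hgx.2]
        simp only [findXGoA, prefTableB, List.filterMap_cons, hne, hb,
          Bool.false_eq_true, if_false]
        have hx : ((n : Int) + e * k) + 1 = (((n + 1 : Nat) : Int)) + e * k := by push_cast; ring
        rw [tail k, hx, ih (n + 1) k]

-- ===== VERDICT (by name: the statement is the Claim_ definition above) =====
theorem find_x_coordinates_spec : Claim_equal_find_x_coordinates := by
  intro line e _
  unfold Spec_find_x_coordinates find_x_coordinates find_x_coordinates_alt
  have h := findX_go_eq e line.toList 0 0
  simpa using h
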